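-- pv_equiv track=rewrite | github.com/helmi666/advent-of-code | day07.py | count_max_chars
-- ===== SOURCE A (Python) =====
-- def count_j(hand: str) -> int:
-- 	return hand.count('J')
--
-- def count_max_chars(hand: str, joker_rule: bool):
-- 	if joker_rule:
-- 		counts = []
-- 		for item in set(hand):
-- 			if item != 'J':
-- 				counts.append(hand.count(item))
-- 		return max(counts) + count_j(hand)
-- 	else:
-- 		counts = []
-- 		for item in set(hand):
-- 			counts.append(hand.count(item))
-- 		return max(counts)
-- ===== SOURCE B (Python) =====
-- def count_max_chars(hand: str, joker_rule: bool):
-- 	counts = {}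
-- 	for ch in hand:
-- 		counts[ch] = counts.get(ch, 0) + 1
-- 	j = counts.pop('J', 0) if joker_rule else 0
-- 	return max(counts.values()) + j
-- ===== Notes on version B (the rewrite author's own statement) =====
-- stated objective: idiomatic
-- what changed: B builds a frequency dictionary in a single pass over the hand (then pops 'J' under the joker rule) instead of A's set() followed by a hand.count() rescan per distinct character.
import Mathlib
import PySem

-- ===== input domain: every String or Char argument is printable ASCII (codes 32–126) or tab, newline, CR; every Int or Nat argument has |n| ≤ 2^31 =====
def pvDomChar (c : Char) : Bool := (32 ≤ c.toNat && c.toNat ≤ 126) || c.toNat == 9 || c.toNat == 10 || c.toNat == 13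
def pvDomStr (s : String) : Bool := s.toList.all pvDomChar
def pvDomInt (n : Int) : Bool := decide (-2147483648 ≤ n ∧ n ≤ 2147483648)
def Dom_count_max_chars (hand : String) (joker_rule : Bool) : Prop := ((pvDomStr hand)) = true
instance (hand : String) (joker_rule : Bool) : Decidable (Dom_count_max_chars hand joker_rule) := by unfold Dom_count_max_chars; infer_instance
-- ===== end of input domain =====

-- B replaces A's set()+per-character hand.count() rescans by one frequency-dict pass (idiomatic counter; return values proved equal on Pre_).

-- ===== PORT A =====
-- hand.count(c) for a single character c is the character count (substring of length 1); ported as list count, exact.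
def count_j (hand : String) : Int := (hand.toList.count 'J' : Int)

-- set(hand) iterated only to build a list whose max is taken: the result is order-independent, so Set.ofList's order is exact here.
def count_max_chars (hand : String) (joker_rule : Bool) : Int :=
  if joker_rule then
    let counts : List Int := (PySem.Set.ofList hand.toList).foldl
      (fun acc item => if item ≠ 'J' then acc ++ [(hand.toList.count item : Int)] else acc) []
    (PySem.List.max? counts (fun x => x)).getD 0 + count_j hand   -- max([]) raises ValueError: excluded by Pre_
  else
    let counts : List Int := (PySem.Set.ofList hand.toList).foldl
      (fun acc item => acc ++ [(hand.toList.count item : Int)]) []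
    (PySem.List.max? counts (fun x => x)).getD 0                  -- max([]) raises ValueError: excluded by Pre_

-- ===== PORT B =====
def count_max_chars_alt (hand : String) (joker_rule : Bool) : Int :=
  let counts := hand.toList.foldl (fun d ch => d.insert ch (d.getD ch 0 + 1)) (PySem.Dict.empty : PySem.Dict Char Int)
  if joker_rule then
    -- counts.pop('J', 0): read the value with default, then erase the key
    let j := counts.getD 'J' 0
    let counts := counts.erase 'J'
    (PySem.List.max? counts.values (fun x => x)).getD 0 + j       -- max of empty dict values raises: excluded by Pre_
  else
    (PySem.List.max? counts.values (fun x => x)).getD 0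

-- ===== PRECONDITION & SPEC =====
-- Pre_ excludes exactly the inputs where both Pythons raise ValueError (max of an empty sequence):
-- the empty hand, and, under the joker rule, a hand consisting only of 'J's.
def Pre_count_max_chars (hand : String) (joker_rule : Bool) : Prop :=
  if joker_rule then hand.toList.any (fun c => c ≠ 'J') = true else hand.toList ≠ []
instance (hand : String) (joker_rule : Bool) : Decidable (Pre_count_max_chars hand joker_rule) := by unfold Pre_count_max_chars; infer_instance
def pvWitness_count_max_chars : String × Bool := ("32T3K", true)
def Spec_count_max_chars (hand : String) (joker_rule : Bool) (out : Int) : Prop := out = count_max_chars_alt hand joker_rule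
instance (hand : String) (joker_rule : Bool) (out : Int) : Decidable (Spec_count_max_chars hand joker_rule out) := by unfold Spec_count_max_chars; infer_instance

-- ===== CLAIM (what is proved, stated in full; the proofs are below) =====
def Claim_equal_count_max_chars : Prop := ∀ (hand : String) (joker_rule : Bool), Dom_count_max_chars hand joker_rule → Pre_count_max_chars hand joker_rule → Spec_count_max_chars hand joker_rule (count_max_chars hand joker_rule)

-- ===== LEMMAS AND PROOFS =====

-- B's dict is Counter(hand); its values (after optionally erasing 'J') list the counts of the
-- distinct characters in first-occurrence order — the same multiset A's loop over set(hand) collects.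
theorem values_counter_eq (l : List Char) :
    (PySem.Dict.counter l).values = (PySem.Set.ofList l).map (fun c => (l.count c : Int)) := by
  simp [PySem.Dict.values, PySem.Dict.items_counter, List.map_map, Function.comp]

theorem values_erase_counter_eq (l : List Char) :
    ((PySem.Dict.counter l).erase 'J').values
      = ((PySem.Set.ofList l).filter (fun c => c ≠ 'J')).map (fun c => (l.count c : Int)) := by
  simp only [PySem.Dict.values, PySem.Dict.erase, PySem.Dict.items_counter]
  rw [List.filter_map, List.map_map]
  congr 1
  apply List.filter_congr
  intro c _
  simp [Bool.beq_eq_decide_eq]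

theorem count_max_chars_spec' (hand : String) (joker_rule : Bool) :
    count_max_chars hand joker_rule = count_max_chars_alt hand joker_rule := by
  unfold count_max_chars count_max_chars_alt count_j
  rw [PySem.Dict.foldl_insert_getD_add_one_eq_counter]
  cases joker_rule with
  | false =>
    rw [if_neg (by simp), if_neg (by simp),
        PySem.List.foldl_append_singleton_eq_map, values_counter_eq]
    simp
  | true =>
    rw [if_pos rfl, if_pos rfl]
    dsimp only
    rw [PySem.List.foldl_append_ite (p := fun item => item ≠ 'J')
        (f := fun item => (hand.toList.count item : Int)), values_erase_counter_eq,
        PySem.Dict.getD_counter]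
    simp

-- ===== VERDICT (by name: the statement is the Claim_ definition above) =====
theorem count_max_chars_spec : Claim_equal_count_max_chars := by
  intro hand joker_rule _ _
  exact count_max_chars_spec' hand joker_rule
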